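-- pv_equiv track=rewrite | github.com/Jameshuff91/open-cure | scripts/h93_mechanism_traversal.py | predict_drugs_for_disease
-- ===== SOURCE A (Python) =====
-- from collections import defaultdict
--
-- def predict_drugs_for_disease(disease_id, disease_genes, gene_to_drugs):
--     """
--     Predict drugs for a disease using mechanism traversal.
--
--     Returns list of (drug_id, score) tuples, sorted by score descending.
--     Score = number of disease genes the drug targets.
--     """
--     if disease_id not in disease_genes:
--         return []
--
--     genes = disease_genes[disease_id]
--
--     # Count how many disease genes each drug targets
--     drug_scores = defaultdict(int)
--     for gene in genes:
--         if gene in gene_to_drugs: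
--             for drug in gene_to_drugs[gene]:
--                 drug_scores[drug] += 1
--
--     # Sort by score (number of genes targeted)
--     ranked_drugs = sorted(drug_scores.items(), key=lambda x: -x[1])
--     return ranked_drugs
-- ===== SOURCE B (Python) =====
-- def predict_drugs_for_disease(disease_id, disease_genes, gene_to_drugs):
--     """
--     Predict drugs for a disease using mechanism traversal.
--
--     Same result as the original, but the comparison sort is replaced by a
--     counting/bucket pass: group drugs by score, then emit buckets from the
--     maximum score down to 1 (ties stay in dict-insertion order).
--     """
--     if disease_id not in disease_genes:
--         return []
--
--     scores = {}
--     for gene in disease_genes[disease_id]: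
--         for drug in gene_to_drugs.get(gene, ()):
--             scores[drug] = scores.get(drug, 0) + 1
--
--     if not scores:
--         return []
--
--     m = max(scores.values())
--     buckets = {}
--     for drug, s in scores.items():
--         buckets.setdefault(s, []).append((drug, s))
--
--     out = []
--     for s in range(m, 0, -1):
--         out.extend(buckets.get(s, ()))
--     return out
-- ===== Notes on version B (the rewrite author's own statement) =====
-- stated objective: alternative
-- what changed: The comparison sort (sorted with key=-score) is replaced by a counting/bucket sort: drugs are grouped into buckets by score and emitted from the maximum score down to 1, preserving descending order and insertion-order ties.
import Mathlib
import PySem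

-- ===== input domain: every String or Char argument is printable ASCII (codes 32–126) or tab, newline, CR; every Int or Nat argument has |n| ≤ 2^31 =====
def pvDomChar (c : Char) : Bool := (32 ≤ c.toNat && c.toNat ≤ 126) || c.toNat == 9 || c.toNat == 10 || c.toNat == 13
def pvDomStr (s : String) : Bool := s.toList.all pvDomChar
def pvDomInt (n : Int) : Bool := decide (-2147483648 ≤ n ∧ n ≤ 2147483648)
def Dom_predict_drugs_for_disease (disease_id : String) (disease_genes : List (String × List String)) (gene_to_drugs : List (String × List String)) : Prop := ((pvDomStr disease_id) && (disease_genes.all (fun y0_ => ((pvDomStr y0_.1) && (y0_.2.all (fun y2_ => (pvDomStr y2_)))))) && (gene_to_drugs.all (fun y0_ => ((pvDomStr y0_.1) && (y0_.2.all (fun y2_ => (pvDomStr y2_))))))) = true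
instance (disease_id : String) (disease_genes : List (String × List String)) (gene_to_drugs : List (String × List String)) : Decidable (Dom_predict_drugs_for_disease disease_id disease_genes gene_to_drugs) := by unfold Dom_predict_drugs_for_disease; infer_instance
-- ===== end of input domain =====

-- B replaces A's comparison sort by a counting/bucket pass (group drugs by score, emit buckets
-- from the maximum score down to 1); same result, alternative algorithm.

-- ===== PORT A =====
def predict_drugs_for_disease (disease_id : String) (disease_genes : List (String × List String)) (gene_to_drugs : List (String × List String)) : List (String × Int) :=
  let dg : PySem.Dict String (List String) := PySem.Dict.ofList disease_genes
  let gtd : PySem.Dict String (List String) := PySem.Dict.ofList gene_to_drugs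
  if dg.contains disease_id = false then []
  else
    let genes := dg.getD disease_id []
    let drug_scores : PySem.Dict String Int := genes.foldl (fun d gene =>
      if gtd.contains gene then
        (gtd.getD gene []).foldl (fun d drug => d.modify drug 0 (· + 1)) d
      else d) PySem.Dict.empty
    PySem.List.sorted drug_scores.items (fun x => -x.2) false

-- ===== PORT B =====
def predict_drugs_for_disease_alt (disease_id : String) (disease_genes : List (String × List String)) (gene_to_drugs : List (String × List String)) : List (String × Int) :=
  let dg : PySem.Dict String (List String) := PySem.Dict.ofList disease_genes
  let gtd : PySem.Dict String (List String) := PySem.Dict.ofList gene_to_drugs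
  if dg.contains disease_id = false then []
  else
    let scores : PySem.Dict String Int := (dg.getD disease_id []).foldl (fun d gene =>
      (gtd.getD gene []).foldl (fun d drug => d.insert drug (d.getD drug 0 + 1)) d) PySem.Dict.empty
    if scores.items = [] then []
    else
      match PySem.List.max? scores.values (fun v => v) with
      | none => []
      | some m =>
        let buckets : PySem.Dict Int (List (String × Int)) :=
          scores.items.foldl (fun b p => b.modify p.2 [] (fun l => l ++ [p])) PySem.Dict.empty
        (PySem.List.pyRange m 0 (-1)).foldl (fun out s => out ++ buckets.getD s []) []

-- ===== PRECONDITION & SPEC =====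
def Spec_predict_drugs_for_disease (disease_id : String) (disease_genes : List (String × List String)) (gene_to_drugs : List (String × List String)) (out : List (String × Int)) : Prop := out = predict_drugs_for_disease_alt disease_id disease_genes gene_to_drugs
instance (disease_id : String) (disease_genes : List (String × List String)) (gene_to_drugs : List (String × List String)) (out : List (String × Int)) : Decidable (Spec_predict_drugs_for_disease disease_id disease_genes gene_to_drugs out) := by unfold Spec_predict_drugs_for_disease; infer_instance

-- ===== CLAIM (what is proved, stated in full; the proofs are below) =====
def Claim_equal_predict_drugs_for_disease : Prop := ∀ (disease_id : String) (disease_genes : List (String × List String)) (gene_to_drugs : List (String × List String)), Dom_predict_drugs_for_disease disease_id disease_genes gene_to_drugs → Spec_predict_drugs_for_disease disease_id disease_genes gene_to_drugs (predict_drugs_for_disease disease_id disease_genes gene_to_drugs)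

-- ===== LEMMAS AND PROOFS =====

theorem pv_insertBy_cons {α : Type} (bf : α → α → Bool) (x y : α) (ys : List α) :
    PySem.List.insertBy bf x (y :: ys) =
      if bf x y then x :: y :: ys else y :: PySem.List.insertBy bf x ys := rfl

theorem pv_insertBy_skip {α : Type} (bf : α → α → Bool) (x : α) (l1 l2 : List α)
    (h : ∀ y ∈ l1, bf x y = false) :
    PySem.List.insertBy bf x (l1 ++ l2) = l1 ++ PySem.List.insertBy bf x l2 := by
  induction l1 with
  | nil => simp
  | cons y ys ih =>
      rw [List.cons_append, pv_insertBy_cons, h y (by simp)]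
      simp only [Bool.false_eq_true, if_false]
      rw [ih (fun z hz => h z (by simp [hz]))]
      simp

theorem pv_insertBy_front {α : Type} (bf : α → α → Bool) (x : α) (l : List α)
    (h : ∀ y ∈ l, bf x y = true) :
    PySem.List.insertBy bf x l = x :: l := by
  cases l with
  | nil => rfl
  | cons y ys => simp [pv_insertBy_cons, h y (by simp)]

theorem pv_flatMap_ext {α β : Type} (L : List α) (f g : α → List β)
    (h : ∀ t ∈ L, f t = g t) : L.flatMap f = L.flatMap g := by
  induction L with
  | nil => rfl
  | cons s L ih =>
      simp only [List.flatMap_cons, h s (by simp)]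
      rw [ih (fun t ht => h t (by simp [ht]))]

theorem pv_insert_buckets (items : List (String × Int)) (x : String × Int) (L : List Int)
    (hd : L.Pairwise (fun a b => b < a)) (hx : x.2 ∈ L) :
    PySem.List.insertBy (fun a b => decide (b.2 < a.2)) x
        (L.flatMap (fun s => items.filter (fun p => p.2 == s)))
      = L.flatMap (fun s => (items ++ [x]).filter (fun p => p.2 == s)) := by
  induction L with
  | nil => simp at hx
  | cons s L ih =>
      have hdL : L.Pairwise (fun a b => b < a) := (List.pairwise_cons.mp hd).2
      have hlt : ∀ t ∈ L, t < s := (List.pairwise_cons.mp hd).1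
      have hmem_bucket : ∀ t y, y ∈ items.filter (fun p => p.2 == t) → y.2 = t := by
        intro t y hy
        have := List.of_mem_filter hy
        simpa using this
      simp only [List.flatMap_cons]
      by_cases hxs : x.2 = s
      · -- x belongs to the first bucket: skip it, then insert at its end
        have hfalse : ∀ y ∈ items.filter (fun p => p.2 == s), (decide (y.2 < x.2)) = false := by
          intro y hy; have := hmem_bucket s y hy; simp [this, hxs]
        have htrue : ∀ y ∈ L.flatMap (fun t => items.filter (fun p => p.2 == t)),
            (decide (y.2 < x.2)) = true := by
          intro y hy
          rcases List.mem_flatMap.mp hy with ⟨t, ht, hyt⟩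
          have := hmem_bucket t y hyt
          simp [this, hxs]; exact hlt t ht
        rw [pv_insertBy_skip _ _ _ _ hfalse, pv_insertBy_front _ _ _ htrue]
        have h1 : (items ++ [x]).filter (fun p => p.2 == s)
            = items.filter (fun p => p.2 == s) ++ [x] := by
          simp [List.filter_append, hxs]
        have h2 : L.flatMap (fun t => (items ++ [x]).filter (fun p => p.2 == t))
            = L.flatMap (fun t => items.filter (fun p => p.2 == t)) := by
          apply pv_flatMap_ext
          intro t ht
          have : x.2 ≠ t := by have := hlt t ht; omega
          simp [List.filter_append, this]
        rw [h1, h2]; simp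
      · -- x belongs to a later bucket
        have hxL : x.2 ∈ L := by
          rcases List.mem_cons.mp hx with h | h
          · exact absurd h hxs
          · exact h
        have hfalse : ∀ y ∈ items.filter (fun p => p.2 == s), (decide (y.2 < x.2)) = false := by
          intro y hy
          have hy2 := hmem_bucket s y hy
          have := hlt _ hxL
          simp [hy2]; omega
        rw [pv_insertBy_skip _ _ _ _ hfalse, ih hdL hxL]
        have h1 : (items ++ [x]).filter (fun p => p.2 == s)
            = items.filter (fun p => p.2 == s) := by
          simp [List.filter_append, hxs]
        rw [h1]

theorem pv_before_eq :
    (fun (a b : String × Int) => decide ((fun x : String × Int => -x.2) a < (fun x : String × Int => -x.2) b))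
      = fun a b => decide (b.2 < a.2) := by
  funext a b
  simp

theorem pv_sorted_eq_buckets (items : List (String × Int)) (m : Int)
    (h1 : ∀ p ∈ items, 1 ≤ p.2) (hm : ∀ p ∈ items, p.2 ≤ m) :
    PySem.List.sorted items (fun x => -x.2) false
      = (PySem.List.pyRange m 0 (-1)).flatMap (fun s => items.filter (fun p => p.2 == s)) := by
  induction items using List.reverseRecOn with
  | nil => simp [PySem.List.sorted]
  | append_singleton items x ih =>
      have hsort : PySem.List.sorted (items ++ [x]) (fun p : String × Int => -p.2) false
          = PySem.List.insertBy (fun a b => decide (b.2 < a.2)) x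
              (PySem.List.sorted items (fun p : String × Int => -p.2) false) := by
        rw [PySem.List.sorted_eq_foldl_insertBy, List.foldl_append,
          ← PySem.List.sorted_eq_foldl_insertBy]
        simp only [List.foldl_cons, List.foldl_nil]
        rw [pv_before_eq]
      have hpair : (PySem.List.pyRange m 0 (-1)).Pairwise (fun a b => b < a) := by
        rw [PySem.List.pyRange_neg_one_eq_reverse]
        rw [List.pairwise_reverse]
        exact PySem.List.pairwise_lt_pyRange_one _ _
      have hxmem : x.2 ∈ PySem.List.pyRange m 0 (-1) := by
        rw [PySem.List.mem_pyRange_neg_one]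
        constructor
        · have := h1 x (by simp); omega
        · exact hm x (by simp)
      rw [hsort, ih (fun p hp => h1 p (by simp [hp])) (fun p hp => hm p (by simp [hp]))]
      exact pv_insert_buckets items x _ hpair hxmem

theorem pv_getD_buckets (l : List (String × Int)) (b : PySem.Dict Int (List (String × Int))) (s : Int) :
    (l.foldl (fun b p => b.modify p.2 [] (fun l => l ++ [p])) b).getD s []
      = b.getD s [] ++ l.filter (fun p => p.2 == s) := by
  induction l generalizing b with
  | nil => simp
  | cons p l ih =>
      simp only [List.foldl_cons]
      rw [ih]
      rw [PySem.Dict.getD_modify]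
      by_cases h : s = p.2
      · simp [h]
      · have : ¬ (p.2 == s) = true := by simp; omega
        simp [h, this]

theorem pv_mem_items_insert {κ ν : Type} [BEq κ] (d : PySem.Dict κ ν) (k : κ) (v : ν)
    (p : κ × ν) (hp : p ∈ (d.insert k v).items) : p = (k, v) ∨ p ∈ d.items := by
  unfold PySem.Dict.insert at hp
  split at hp
  · simp only [List.mem_map] at hp
    rcases hp with ⟨q, hq, hqe⟩
    by_cases h : (q.1 == k) = true
    · left; rw [← hqe]; simp [h]
    · right; rw [← hqe]; simpa [h] using hq
  · rcases List.mem_append.mp hp with h | h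
    · right; exact h
    · left; simpa using h

theorem pv_pos_drugfold (l : List String) (d : PySem.Dict String Int)
    (h : ∀ p ∈ d.items, 1 ≤ p.2) :
    ∀ p ∈ (l.foldl (fun d drug => d.insert drug (d.getD drug 0 + 1)) d).items, 1 ≤ p.2 := by
  induction l generalizing d with
  | nil => exact h
  | cons drug l ih =>
      simp only [List.foldl_cons]
      apply ih
      intro p hp
      rcases pv_mem_items_insert _ _ _ _ hp with h1 | h1
      · subst h1
        simp only
        rw [PySem.Dict.getD_eq_get?_getD]
        cases hg : d.get? drug with
        | none => simp
        | some v =>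
            have := h (drug, v) (PySem.Dict.mem_items_of_get?_eq_some d hg)
            simp at this ⊢
            omega
      · exact h p h1

theorem pv_pos_genefold (genes : List String) (gtd : PySem.Dict String (List String))
    (d : PySem.Dict String Int) (h : ∀ p ∈ d.items, 1 ≤ p.2) :
    ∀ p ∈ (genes.foldl (fun d gene =>
        (gtd.getD gene []).foldl (fun d drug => d.insert drug (d.getD drug 0 + 1)) d) d).items,
      1 ≤ p.2 := by
  induction genes generalizing d with
  | nil => exact h
  | cons gene genes ih =>
      simp only [List.foldl_cons]
      exact ih _ (pv_pos_drugfold _ _ h)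

theorem pv_counting_eq (genes : List String) (gtd : PySem.Dict String (List String)) :
    genes.foldl (fun d gene =>
        if gtd.contains gene then
          (gtd.getD gene []).foldl (fun d drug => d.modify drug 0 (· + 1)) d
        else d) (PySem.Dict.empty : PySem.Dict String Int)
      = genes.foldl (fun d gene =>
          (gtd.getD gene []).foldl (fun d drug => d.insert drug (d.getD drug 0 + 1)) d)
          (PySem.Dict.empty : PySem.Dict String Int) := by
  have hfun : (fun (d : PySem.Dict String Int) gene =>
        if gtd.contains gene then
          (gtd.getD gene []).foldl (fun d drug => d.modify drug 0 (· + 1)) d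
        else d)
      = (fun d gene =>
          (gtd.getD gene []).foldl (fun d drug => d.insert drug (d.getD drug 0 + 1)) d) := by
    funext d gene
    by_cases h : gtd.contains gene = true
    · simp only [h, if_true]; rfl
    · have h' : gtd.contains gene = false := by simpa using h
      rw [if_neg (by simp [h']), PySem.Dict.getD_of_not_contains _ _ h']
      rfl
  exact congrArg (fun f => List.foldl f PySem.Dict.empty genes) hfun

theorem pv_items_empty {κ ν : Type} [BEq κ] : (PySem.Dict.empty : PySem.Dict κ ν).items = [] := rfl

-- ===== VERDICT (by name: the statement is the Claim_ definition above) =====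
theorem predict_drugs_for_disease_spec : Claim_equal_predict_drugs_for_disease := by
  unfold Claim_equal_predict_drugs_for_disease
  intro disease_id disease_genes gene_to_drugs _
  unfold Spec_predict_drugs_for_disease
  unfold predict_drugs_for_disease predict_drugs_for_disease_alt
  simp only []
  set dg := (PySem.Dict.ofList disease_genes : PySem.Dict String (List String)) with hdg
  set gtd := (PySem.Dict.ofList gene_to_drugs : PySem.Dict String (List String)) with hgtd
  by_cases hc : dg.contains disease_id = false
  · simp [hc]
  · simp only [hc]
    set genes := dg.getD disease_id [] with hgenes
    rw [pv_counting_eq genes gtd]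
    set scores := genes.foldl (fun d gene =>
        (gtd.getD gene []).foldl (fun d drug => d.insert drug (d.getD drug 0 + 1)) d)
        (PySem.Dict.empty : PySem.Dict String Int) with hscores
    by_cases hnil : scores.items = []
    · simp [hnil, PySem.List.sorted]
    · simp only [hnil, if_false]
      have hvals : scores.values = scores.items.map (fun p => p.2) := rfl
      have hvne : scores.values ≠ [] := by
        rw [hvals]; simpa using hnil
      cases hmax : PySem.List.max? scores.values (fun v => v) with
      | none => exact absurd ((PySem.List.max?_eq_none_iff _ _).mp hmax) hvne
      | some m =>
          simp only []
          have hpos : ∀ p ∈ scores.items, 1 ≤ p.2 := by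
            rw [hscores]
            exact pv_pos_genefold genes gtd PySem.Dict.empty (by simp [pv_items_empty])
          have hle : ∀ p ∈ scores.items, p.2 ≤ m := by
            intro p hp
            have : p.2 ∈ scores.values := by
              rw [hvals]; exact List.mem_map_of_mem hp
            exact PySem.List.max?_isMax hmax _ this
          have hbfun : (fun (out : List (String × Int)) s =>
                out ++ (scores.items.foldl (fun b p => b.modify p.2 [] (fun l => l ++ [p]))
                  (PySem.Dict.empty : PySem.Dict Int (List (String × Int)))).getD s [])
              = (fun out s => out ++ scores.items.filter (fun p => p.2 == s)) := by
            funext out s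
            rw [pv_getD_buckets, PySem.Dict.getD_empty]
            simp
          rw [hbfun, PySem.List.foldl_append_eq_flatMap]
          simp only [List.nil_append]
          exact pv_sorted_eq_buckets scores.items m hpos hle
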